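-- pv_equiv track=rewrite | github.com/karlsoro/transcribems | src/core/logging.py | _mask_file_path
-- ===== SOURCE A (Python) =====
-- def _mask_file_path(file_path: str) -> str:
--     """Mask sensitive parts of file paths."""
--     if "/home/" in file_path or "/Users/" in file_path:
--         parts = file_path.split("/")
--         masked_parts = []
--         for part in parts:
--             if part in ["home", "Users"] or part.startswith("user"):
--                 masked_parts.append("***")
--             else:
--                 masked_parts.append(part)
--         return "/".join(masked_parts)
--     return file_path
-- ===== SOURCE B (Python) =====
-- def _seg(part: str) -> str:
--     return "***" if part in ("home", "Users") or part.startswith("user") else part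
--
--
-- def _masked(s: str) -> str:
--     i = s.find("/")
--     if i < 0:
--         return _seg(s)
--     return _seg(s[:i]) + "/" + _masked(s[i + 1:])
--
--
-- def _mask_file_path(file_path: str) -> str:
--     if "/home/" in file_path or "/Users/" in file_path:
--         return _masked(file_path)
--     return file_path
-- ===== Notes on version B (the rewrite author's own statement) =====
-- stated objective: alternative
-- what changed: Replaces split-into-list / append-loop / join with a direct recursion that finds the first slash separator and emits the masked segment plus a recursive call on the rest, never materialising the parts list.
import Mathlib
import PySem

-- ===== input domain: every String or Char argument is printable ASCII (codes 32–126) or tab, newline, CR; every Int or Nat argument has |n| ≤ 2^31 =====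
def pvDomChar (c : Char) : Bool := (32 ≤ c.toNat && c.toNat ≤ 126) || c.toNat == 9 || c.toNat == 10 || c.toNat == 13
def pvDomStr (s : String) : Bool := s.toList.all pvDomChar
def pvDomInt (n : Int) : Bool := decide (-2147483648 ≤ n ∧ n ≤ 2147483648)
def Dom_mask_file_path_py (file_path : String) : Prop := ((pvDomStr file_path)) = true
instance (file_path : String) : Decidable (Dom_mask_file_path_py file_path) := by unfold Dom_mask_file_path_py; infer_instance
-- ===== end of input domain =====

-- B masks the same segments as A but by direct recursion on the first slash separator instead of split / append-loop / join (objective: alternative).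

-- ===== PORT A =====
def mask_file_path_py (file_path : String) : String :=
  if PySem.Chars.isIn "/home/".toList file_path.toList || PySem.Chars.isIn "/Users/".toList file_path.toList then
    let parts := PySem.Chars.splitOn file_path.toList "/".toList
    let masked_parts := parts.foldl (fun acc part =>
      acc ++ [if (["home".toList, "Users".toList].contains part || PySem.Chars.startswith part "user".toList) then "***".toList else part]) []
    String.ofList (PySem.Chars.join "/".toList masked_parts)
  else file_path

-- ===== PORT B =====
-- helper _seg of Source B
def pvSeg (part : List Char) : List Char :=
  if (["home".toList, "Users".toList].contains part || PySem.Chars.startswith part "user".toList) then "***".toList else part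

-- termination fact for pvMasked (cited in decreasing_by)
theorem pvMasked_dec (s : List Char) (h : ¬ PySem.Chars.find s "/".toList < 0) :
    (PySem.List.slice s (some (PySem.Chars.find s "/".toList + 1)) none).length < s.length := by
  have h0 : 0 ≤ PySem.Chars.find s "/".toList := by omega
  obtain ⟨hpre, -⟩ := PySem.Chars.find_spec h0
  obtain ⟨t, ht⟩ := hpre
  have hk : (PySem.Chars.find s "/".toList).toNat < s.length := by
    have h2 := congrArg List.length ht
    rw [List.length_append, List.length_drop] at h2
    have h3 : ("/".toList).length = 1 := rfl
    omega
  rw [PySem.List.slice_from s (by omega : (0:Int) ≤ PySem.Chars.find s "/".toList + 1)]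
  rw [List.length_drop]
  omega

-- helper _masked of Source B
def pvMasked (s : List Char) : List Char :=
  let i := PySem.Chars.find s "/".toList
  if _h : i < 0 then pvSeg s
  else pvSeg (PySem.List.slice s none (some i)) ++ "/".toList ++ pvMasked (PySem.List.slice s (some (i + 1)) none)
termination_by s.length
decreasing_by exact pvMasked_dec s _h

def mask_file_path_py_alt (file_path : String) : String :=
  if PySem.Chars.isIn "/home/".toList file_path.toList || PySem.Chars.isIn "/Users/".toList file_path.toList then
    String.ofList (pvMasked file_path.toList)
  else file_path

-- ===== PRECONDITION & SPEC =====
def Spec_mask_file_path_py (file_path : String) (out : String) : Prop := out = mask_file_path_py_alt file_path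
instance (file_path : String) (out : String) : Decidable (Spec_mask_file_path_py file_path out) := by unfold Spec_mask_file_path_py; infer_instance

-- ===== CLAIM (what is proved, stated in full; the proofs are below) =====
def Claim_equal_mask_file_path_py : Prop := ∀ (file_path : String), Dom_mask_file_path_py file_path → Spec_mask_file_path_py file_path (mask_file_path_py file_path)

-- ===== LEMMAS AND PROOFS =====

-- clean structural form of CPython's str.split for the one-char slash separator
def pvSplitAux : List Char → List Char → List (List Char)
  | [], cur => [cur.reverse]
  | c :: rest, cur => if c = '/' then cur.reverse :: pvSplitAux rest [] else pvSplitAux rest (c :: cur)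

theorem pv_go_spec : ∀ (fuel : Nat) (l cur : List Char) (acc : List (List Char)), l.length < fuel →
    PySem.Chars.splitOn.go ['/'] fuel l cur acc = acc.reverse ++ pvSplitAux l cur := by
  intro fuel
  induction fuel with
  | zero => intro l cur acc h; omega
  | succ n ih =>
    intro l cur acc h
    cases l with
    | nil => simp [PySem.Chars.splitOn.go, pvSplitAux]
    | cons c rest =>
      by_cases hc : c = '/'
      · subst hc
        rw [show PySem.Chars.splitOn.go ['/'] (n+1) ('/' :: rest) cur acc
              = PySem.Chars.splitOn.go ['/'] n (List.drop 1 ('/' :: rest)) [] (cur.reverse :: acc) by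
            simp [PySem.Chars.splitOn.go, List.isPrefixOf]]
        rw [show List.drop 1 ('/' :: rest) = rest from rfl]
        rw [ih _ _ _ (by simpa using Nat.lt_of_succ_lt_succ h)]
        simp [pvSplitAux]
      · rw [show PySem.Chars.splitOn.go ['/'] (n+1) (c :: rest) cur acc
              = PySem.Chars.splitOn.go ['/'] n rest (c :: cur) acc by
            simp [PySem.Chars.splitOn.go, List.isPrefixOf, show ¬ '/' = c from fun h => hc h.symm]]
        rw [ih _ _ _ (by simpa using Nat.lt_of_succ_lt_succ h)]
        simp [pvSplitAux, hc]

theorem pv_splitOn_eq (s : List Char) : PySem.Chars.splitOn s ['/'] = pvSplitAux s [] := by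
  rw [PySem.Chars.splitOn, pv_go_spec (s.length + 1) s [] [] (by omega)]
  simp

theorem pv_splitAux_no_slash : ∀ (l cur : List Char), '/' ∉ l → pvSplitAux l cur = [cur.reverse ++ l] := by
  intro l
  induction l with
  | nil => intro cur _; simp [pvSplitAux]
  | cons c rest ih =>
    intro cur h
    have hc : c ≠ '/' := fun hh => h (by simp [hh])
    simp [pvSplitAux, hc, ih (c :: cur) (fun hm => h (by simp [hm]))]

theorem pv_splitAux_append : ∀ (l : List Char) (t cur : List Char), '/' ∉ l →
    pvSplitAux (l ++ '/' :: t) cur = (cur.reverse ++ l) :: pvSplitAux t [] := by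
  intro l
  induction l with
  | nil => intro t cur _; simp [pvSplitAux]
  | cons c rest ih =>
    intro t cur h
    have hc : c ≠ '/' := fun hh => h (by simp [hh])
    simp [pvSplitAux, hc, ih t (c :: cur) (fun hm => h (by simp [hm]))]

theorem pv_splitAux_ne_nil : ∀ (l cur : List Char), pvSplitAux l cur ≠ [] := by
  intro l
  induction l with
  | nil => intro cur; simp [pvSplitAux]
  | cons c rest ih => intro cur; by_cases hc : c = '/' <;> simp [pvSplitAux, hc, ih]

theorem pv_join_cons (a y : List Char) (ys : List (List Char)) :
    PySem.Chars.join ['/'] (a :: y :: ys) = a ++ ['/'] ++ PySem.Chars.join ['/'] (y :: ys) := by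
  simp [PySem.Chars.join, List.intercalate]

theorem pv_slash_infix_iff (s : List Char) : ['/'] <:+: s ↔ '/' ∈ s := by
  constructor
  · rintro ⟨p, q, rfl⟩; simp
  · intro hm
    obtain ⟨p, q, rfl⟩ := List.mem_iff_append.mp hm
    exact ⟨p, q, by simp⟩

theorem pv_masked_eq_aux : ∀ (n : Nat) (s : List Char), s.length < n →
    pvMasked s = PySem.Chars.join ['/'] ((pvSplitAux s []).map pvSeg) := by
  intro n
  induction n with
  | zero => intro s h; omega
  | succ n ih =>
    intro s hs
    rw [pvMasked]
    simp only [show ("/".toList : List Char) = ['/'] from rfl]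
    by_cases hneg : PySem.Chars.find s ['/'] < 0
    · rw [dif_pos hneg]
      have hni : ¬ (['/'] : List Char) <:+: s := by
        refine (PySem.Chars.find_eq_neg_one_iff s ['/']).mp ?_
        have := PySem.Chars.neg_one_le_find s ['/']
        omega
      have hnm : '/' ∉ s := fun hm => hni ((pv_slash_infix_iff s).mpr hm)
      rw [pv_splitAux_no_slash s [] hnm]
      simp [PySem.Chars.join, List.intercalate]
    · rw [dif_neg hneg]
      have h0 : 0 ≤ PySem.Chars.find s ['/'] := by omega
      obtain ⟨hpre, hmin⟩ := PySem.Chars.find_spec h0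
      set k := (PySem.Chars.find s ['/']).toNat with hk
      obtain ⟨t, ht⟩ := hpre
      have hkl : k < s.length := by
        have h2 := congrArg List.length ht
        rw [List.length_append, List.length_drop] at h2
        simp at h2
        omega
      have hdrop : s.drop k = '/' :: s.drop (k + 1) := by
        have h1 : s.drop (k + 1) = (s.drop k).drop 1 := by
          rw [List.drop_drop]
        rw [h1, ← ht]
        rfl
      have hsplit : s = s.take k ++ '/' :: s.drop (k + 1) := by
        conv_lhs => rw [← List.take_append_drop k s]
        rw [hdrop]
      have hno : '/' ∉ s.take k := by
        intro hm
        obtain ⟨j, hj, hje⟩ := List.getElem_of_mem hm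
        have hjk : j < k := lt_of_lt_of_le hj (by simp)
        have hjl : j < s.length := lt_trans hjk hkl
        apply hmin j hjk
        refine ⟨s.drop (j + 1), ?_⟩
        rw [List.drop_eq_getElem_cons hjl]
        simp only [List.getElem_take] at hje
        simp [hje]
      have hrhs : pvSplitAux s [] = s.take k :: pvSplitAux (s.drop (k + 1)) [] := by
        conv_lhs => rw [hsplit]
        simpa using pv_splitAux_append (s.take k) (s.drop (k + 1)) [] hno
      obtain ⟨y, ys, hys⟩ := List.exists_cons_of_ne_nil (pv_splitAux_ne_nil (s.drop (k + 1)) [])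
      have hih := ih (s.drop (k + 1)) (by rw [List.length_drop]; omega)
      rw [hrhs, hys, List.map_cons, List.map_cons, pv_join_cons]
      rw [PySem.List.slice_to s h0, PySem.List.slice_from s (by omega : (0:Int) ≤ PySem.Chars.find s ['/'] + 1)]
      have hi1 : (PySem.Chars.find s ['/'] + 1).toNat = k + 1 := by omega
      rw [hi1, ← hk, hih, hys, List.map_cons]

theorem pv_masked_eq (s : List Char) :
    pvMasked s = PySem.Chars.join ['/'] ((pvSplitAux s []).map pvSeg) :=
  pv_masked_eq_aux (s.length + 1) s (by omega)

-- ===== VERDICT (by name: the statement is the Claim_ definition above) =====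
theorem mask_file_path_py_spec : Claim_equal_mask_file_path_py := by
  intro fp _
  unfold Spec_mask_file_path_py mask_file_path_py mask_file_path_py_alt
  by_cases hg : (PySem.Chars.isIn "/home/".toList fp.toList || PySem.Chars.isIn "/Users/".toList fp.toList) = true
  · rw [if_pos hg, if_pos hg]
    show String.ofList (PySem.Chars.join ['/']
        (List.foldl (fun acc part => acc ++ [pvSeg part]) [] (PySem.Chars.splitOn fp.toList ['/'])))
      = String.ofList (pvMasked fp.toList)
    rw [PySem.List.foldl_append_singleton_eq_map, List.nil_append, pv_splitOn_eq, ← pv_masked_eq]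
  · rw [if_neg hg, if_neg hg]
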